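-- pv_equiv track=rewrite | github.com/posl/comment_recommendation | script/mod_gen/4_time/zh/241_C/6.py | check
-- ===== SOURCE A (Python) =====
-- def check(n, s):
--     for i in range(n):
--         for j in range(n):
--             if s[i][j] == '#':
--                 if j < n - 5 and s[i][j:j+6] == '######':
--                     return True
--                 if i < n - 5 and s[i][j] == '#' and s[i+1][j] == '#' and s[i+2][j] == '#' and s[i+3][j] == '#' and s[i+4][j] == '#' and s[i+5][j] == '#':
--                     return True
--                 if i < n - 5 and j < n - 5 and s[i][j] == '#' and s[i+1][j+1] == '#' and s[i+2][j+2] == '#' and s[i+3][j+3] == '#' and s[i+4][j+4] == '#' and s[i+5][j+5] == '#':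
--                     return True
--     return False
-- ===== SOURCE B (Python) =====
-- def check(n, s):
--     g = [s[i][:n] for i in range(n)]
--     lines = list(g)
--     for c in range(n):
--         lines.append(''.join(g[r][c] for r in range(n)))
--     for c in range(n):
--         lines.append(''.join(g[k][c + k] for k in range(n - c)))
--     for r in range(1, n):
--         lines.append(''.join(g[r + k][k] for k in range(n - r)))
--     return any('######' in line for line in lines)
-- ===== Notes on version B (the rewrite author's own statement) =====
-- stated objective: idiomatic
-- what changed: B builds explicit line strings (rows, columns, down-right diagonals of the n-by-n block) and answers with a single substring search '######' in line, replacing A's per-cell hand-unrolled six-fold conjunction checks for each direction.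
-- outside the precondition, e.g. on check(6, ['######']): A returns True, B raises IndexError
import Mathlib
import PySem

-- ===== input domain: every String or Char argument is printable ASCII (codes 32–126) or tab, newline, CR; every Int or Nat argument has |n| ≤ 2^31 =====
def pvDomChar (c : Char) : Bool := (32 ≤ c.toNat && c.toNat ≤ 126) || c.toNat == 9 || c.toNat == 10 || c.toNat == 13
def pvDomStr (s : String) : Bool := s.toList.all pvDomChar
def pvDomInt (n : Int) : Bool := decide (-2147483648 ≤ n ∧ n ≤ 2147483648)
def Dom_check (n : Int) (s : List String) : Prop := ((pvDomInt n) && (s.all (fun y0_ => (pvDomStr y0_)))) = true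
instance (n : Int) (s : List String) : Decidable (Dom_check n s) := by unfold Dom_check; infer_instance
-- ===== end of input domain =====

-- B builds the row/column/down-right-diagonal line strings of the n×n block and does one
-- substring search '######' per line, instead of A's per-cell hand-unrolled conjunction checks.

-- the six-'#' pattern literal
def pvHash6 : List Char := ['#', '#', '#', '#', '#', '#']

-- s[i][j] (both indices nonnegative and in range under Pre_)
def pvCell (s : List String) (i j : Int) : Char :=
  PySem.List.pyGetD (PySem.List.pyGetD s i "").toList j ' '

-- ===== PORT A =====
def check (n : Int) (s : List String) : Bool :=
  (PySem.List.pyRange 0 n 1).any (fun i =>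
    (PySem.List.pyRange 0 n 1).any (fun j =>
      if pvCell s i j = '#' then
        (decide (j < n - 5) &&
           decide (PySem.List.slice (PySem.List.pyGetD s i "").toList (some j) (some (j + 6)) = pvHash6))
        || (decide (i < n - 5) && (pvCell s i j == '#') && (pvCell s (i+1) j == '#')
             && (pvCell s (i+2) j == '#') && (pvCell s (i+3) j == '#')
             && (pvCell s (i+4) j == '#') && (pvCell s (i+5) j == '#'))
        || (decide (i < n - 5) && decide (j < n - 5) && (pvCell s i j == '#') && (pvCell s (i+1) (j+1) == '#')
             && (pvCell s (i+2) (j+2) == '#') && (pvCell s (i+3) (j+3) == '#')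
             && (pvCell s (i+4) (j+4) == '#') && (pvCell s (i+5) (j+5) == '#'))
      else false))

-- ===== PORT B =====
def check_alt (n : Int) (s : List String) : Bool :=
  let g : List (List Char) :=
    (PySem.List.pyRange 0 n 1).map
      (fun i => PySem.List.slice (PySem.List.pyGetD s i "").toList none (some n))
  let cell : Int → Int → Char := fun r c => PySem.List.pyGetD (PySem.List.pyGetD g r []) c ' '
  let cols : List (List Char) :=
    (PySem.List.pyRange 0 n 1).map (fun c => (PySem.List.pyRange 0 n 1).map (fun r => cell r c))
  let d1 : List (List Char) :=
    (PySem.List.pyRange 0 n 1).map (fun c => (PySem.List.pyRange 0 (n - c) 1).map (fun k => cell k (c + k)))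
  let d2 : List (List Char) :=
    (PySem.List.pyRange 1 n 1).map (fun r => (PySem.List.pyRange 0 (n - r) 1).map (fun k => cell (r + k) k))
  (g ++ cols ++ d1 ++ d2).any (fun line => PySem.Chars.isIn pvHash6 line)

-- ===== PRECONDITION & SPEC =====
-- Pre_ excludes inputs where the grid has no full n×n character block (fewer than n rows, or one
-- of the first n rows shorter than n): on those A raises IndexError, except that it may return
-- True first when a run of '#' is found before the missing cell is touched (B raises there too).
def Pre_check (n : Int) (s : List String) : Prop :=
  n ≤ (s.length : Int) ∧ ∀ r ∈ s.take n.toNat, n ≤ (r.toList.length : Int)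
instance (n : Int) (s : List String) : Decidable (Pre_check n s) := by unfold Pre_check; infer_instance

def pvWitness_check : Int × List String := (2, ["#.", ".#"])

def Spec_check (n : Int) (s : List String) (out : Bool) : Prop := out = check_alt n s
instance (n : Int) (s : List String) (out : Bool) : Decidable (Spec_check n s out) := by unfold Spec_check; infer_instance

-- ===== CLAIM (what is proved, stated in full; the proofs are below) =====
def Claim_equal_check : Prop := ∀ (n : Int) (s : List String), Dom_check n s → Pre_check n s → Spec_check n s (check n s)

-- ===== LEMMAS AND PROOFS =====

-- a run of six '#' in l starting at position k
def pvRunN (l : List Char) (k : Nat) : Prop := ∀ t : Nat, t < 6 → l[k + t]? = some '#'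

-- the common normal form of both programs: some cell (i, j) of the n×n block anchors a run of six
def pvHit (n : Int) (s : List String) : Prop :=
  ∃ i j : Int, 0 ≤ i ∧ i < n ∧ 0 ≤ j ∧ j < n ∧
    ((j < n - 5 ∧ ∀ t : Nat, t < 6 → pvCell s i (j + t) = '#') ∨
     (i < n - 5 ∧ ∀ t : Nat, t < 6 → pvCell s (i + t) j = '#') ∨
     (i < n - 5 ∧ j < n - 5 ∧ ∀ t : Nat, t < 6 → pvCell s (i + t) (j + t) = '#'))

lemma take_drop_eq_hash6_iff (l : List Char) (k : Nat) :
    (l.drop k).take 6 = pvHash6 ↔ pvRunN l k := by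
  constructor
  · intro h t ht
    have h1 : ((l.drop k).take 6)[t]? = pvHash6[t]? := by rw [h]
    rw [List.getElem?_take_of_lt ht, List.getElem?_drop] at h1
    rw [h1]
    interval_cases t <;> rfl
  · intro h
    apply List.ext_getElem?
    intro t
    by_cases ht : t < 6
    · rw [List.getElem?_take_of_lt ht, List.getElem?_drop, h t ht]
      interval_cases t <;> rfl
    · have h5 := h 5 (by omega)
      have hlen : k + 6 ≤ l.length := by
        by_contra hc
        rw [List.getElem?_eq_none (by omega)] at h5
        exact absurd h5 (by simp)
      rw [List.getElem?_eq_none, List.getElem?_eq_none]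
      · simp [pvHash6]; omega
      · simp; omega

lemma infix_hash6_iff (l : List Char) : pvHash6 <:+: l ↔ ∃ k : Nat, pvRunN l k := by
  constructor
  · rintro ⟨u, v, huv⟩
    refine ⟨u.length, ?_⟩
    rw [← take_drop_eq_hash6_iff]
    rw [← huv, List.append_assoc, List.drop_left' rfl]
    simp [pvHash6]
  · rintro ⟨k, hk⟩
    rw [← take_drop_eq_hash6_iff] at hk
    refine ⟨l.take k, (l.drop k).drop 6, ?_⟩
    rw [List.append_assoc, ← hk, List.take_append_drop, List.take_append_drop]

-- row i of the grid, as a list of characters, under Pre_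
lemma row_long (n : Int) (s : List String) (h : Pre_check n s) (i : Int) (h0 : 0 ≤ i) (h1 : i < n) :
    n ≤ ((PySem.List.pyGetD s i "").toList.length : Int) := by
  obtain ⟨hn, hrows⟩ := h
  have hi : i.toNat < s.length := by omega
  rw [PySem.List.pyGetD_eq_getElem s "" h0 (by omega)]
  exact hrows s[i.toNat] (List.mem_take_iff_getElem.mpr ⟨i.toNat, by omega, rfl⟩)

lemma cell_eq_getElem? (n : Int) (s : List String) (h : Pre_check n s) (i j : Int)
    (hi0 : 0 ≤ i) (hi1 : i < n) (hj0 : 0 ≤ j) (hj1 : j < n) :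
    ((PySem.List.pyGetD s i "").toList)[j.toNat]? = some (pvCell s i j) := by
  have hlen := row_long n s h i hi0 hi1
  unfold pvCell
  rw [PySem.List.pyGetD_eq_getElem _ ' ' hj0 (by omega)]
  exact List.getElem?_eq_getElem (by omega)

lemma runN_take (l : List Char) (N k : Nat) :
    pvRunN (l.take N) k ↔ (k + 6 ≤ N ∧ ∀ t : Nat, t < 6 → l[k + t]? = some '#') := by
  constructor
  · intro hr
    have hk : k + 6 ≤ N := by
      by_contra hc
      have h5 := hr 5 (by omega)
      rw [List.getElem?_eq_none (by rw [List.length_take]; omega)] at h5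
      exact absurd h5 (by simp)
    exact ⟨hk, fun t ht => by
      have := hr t ht
      rwa [List.getElem?_take_of_lt (by omega)] at this⟩
  · rintro ⟨hk, hv⟩ t ht
    rw [List.getElem?_take_of_lt (by omega)]
    exact hv t ht

lemma runN_map_pyRange (f : Int → Char) (m : Int) (k : Nat) :
    pvRunN ((PySem.List.pyRange 0 m 1).map f) k ↔
      ((k : Int) + 6 ≤ m ∧ ∀ t : Nat, t < 6 → f ((k : Int) + (t : Int)) = '#') := by
  constructor
  · intro hr
    have hb : k + 6 ≤ (m - 0).toNat := by
      by_contra hc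
      have h5 := hr 5 (by omega)
      rw [List.getElem?_eq_none (by
        rw [List.length_map, PySem.List.length_pyRange_one]; omega)] at h5
      exact absurd h5 (by simp)
    refine ⟨by omega, fun t ht => ?_⟩
    have h := hr t ht
    rw [List.getElem?_map, PySem.List.getElem?_pyRange_one, if_pos (by omega)] at h
    simp only [Option.map_some] at h
    have harg : (0 : Int) + ((k + t : Nat) : Int) = (k : Int) + (t : Int) := by push_cast; ring
    rw [harg] at h
    exact Option.some.inj h
  · rintro ⟨hm, hv⟩ t ht
    rw [List.getElem?_map, PySem.List.getElem?_pyRange_one, if_pos (by omega)]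
    simp only [Option.map_some]
    have harg : (0 : Int) + ((k + t : Nat) : Int) = (k : Int) + (t : Int) := by push_cast; ring
    rw [harg, hv t ht]

-- A's port is true exactly on a hit
lemma checkA_iff (n : Int) (s : List String) (h : Pre_check n s) :
    check n s = true ↔ pvHit n s := by
  unfold check
  simp only [List.any_eq_true, PySem.List.mem_pyRange_one]
  constructor
  · rintro ⟨i, ⟨hi0, hi1⟩, j, ⟨hj0, hj1⟩, hb⟩
    by_cases hc : pvCell s i j = '#'
    · rw [if_pos hc] at hb
      simp only [Bool.or_eq_true, Bool.and_eq_true, decide_eq_true_eq, beq_iff_eq] at hb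
      refine ⟨i, j, hi0, hi1, hj0, hj1, ?_⟩
      rcases hb with (⟨hj5, hsl⟩ | ⟨⟨⟨⟨⟨⟨hi5, c0⟩, c1⟩, c2⟩, c3⟩, c4⟩, c5⟩) |
        ⟨⟨⟨⟨⟨⟨⟨hi5, hj5⟩, c0⟩, c1⟩, c2⟩, c3⟩, c4⟩, c5⟩
      · left
        refine ⟨hj5, fun t ht => ?_⟩
        rw [PySem.List.slice_toNat _ hj0 (by omega)] at hsl
        rw [show ((j : Int) + 6).toNat - j.toNat = 6 by omega, take_drop_eq_hash6_iff] at hsl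
        have hrun := hsl t ht
        have hcell := cell_eq_getElem? n s h i (j + t) hi0 hi1 (by omega) (by omega)
        rw [show ((j : Int) + (t : Int)).toNat = j.toNat + t by omega] at hcell
        rw [hcell] at hrun
        exact Option.some.inj hrun
      · right; left
        refine ⟨hi5, fun t ht => ?_⟩
        interval_cases t
        · simpa using c0
        · simpa using c1
        · simpa using c2
        · simpa using c3
        · simpa using c4
        · simpa using c5
      · right; right
        refine ⟨hi5, hj5, fun t ht => ?_⟩
        interval_cases t
        · simpa using c0
        · simpa using c1
        · simpa using c2
        · simpa using c3
        · simpa using c4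
        · simpa using c5
    · rw [if_neg hc] at hb
      exact absurd hb (by simp)
  · rintro ⟨i, j, hi0, hi1, hj0, hj1, hcase⟩
    refine ⟨i, ⟨hi0, hi1⟩, j, ⟨hj0, hj1⟩, ?_⟩
    rcases hcase with ⟨hj5, hr⟩ | ⟨hi5, hr⟩ | ⟨hi5, hj5, hr⟩
    · have hc : pvCell s i j = '#' := by simpa using hr 0 (by norm_num)
      rw [if_pos hc]
      simp only [Bool.or_eq_true, Bool.and_eq_true, decide_eq_true_eq, beq_iff_eq]
      left; left
      refine ⟨hj5, ?_⟩
      rw [PySem.List.slice_toNat _ hj0 (by omega)]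
      rw [show ((j : Int) + 6).toNat - j.toNat = 6 by omega, take_drop_eq_hash6_iff]
      intro t ht
      have hcell := cell_eq_getElem? n s h i (j + t) hi0 hi1 (by omega) (by omega)
      rw [show ((j : Int) + (t : Int)).toNat = j.toNat + t by omega] at hcell
      rw [hcell, hr t ht]
    · have hc : pvCell s i j = '#' := by simpa using hr 0 (by norm_num)
      rw [if_pos hc]
      simp only [Bool.or_eq_true, Bool.and_eq_true, decide_eq_true_eq, beq_iff_eq]
      left; right
      refine ⟨⟨⟨⟨⟨⟨hi5, by simpa using hr 0 (by norm_num)⟩, by simpa using hr 1 (by norm_num)⟩,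
        by simpa using hr 2 (by norm_num)⟩, by simpa using hr 3 (by norm_num)⟩,
        by simpa using hr 4 (by norm_num)⟩, by simpa using hr 5 (by norm_num)⟩
    · have hc : pvCell s i j = '#' := by simpa using hr 0 (by norm_num)
      rw [if_pos hc]
      simp only [Bool.or_eq_true, Bool.and_eq_true, decide_eq_true_eq, beq_iff_eq]
      right
      refine ⟨⟨⟨⟨⟨⟨⟨hi5, hj5⟩, by simpa using hr 0 (by norm_num)⟩, by simpa using hr 1 (by norm_num)⟩,
        by simpa using hr 2 (by norm_num)⟩, by simpa using hr 3 (by norm_num)⟩,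
        by simpa using hr 4 (by norm_num)⟩, by simpa using hr 5 (by norm_num)⟩

-- B's truncated-grid accessor agrees with pvCell inside the n×n block
lemma cellB_eq (n : Int) (s : List String) (h : Pre_check n s) (r c : Int)
    (hr0 : 0 ≤ r) (hr1 : r < n) (hc0 : 0 ≤ c) (hc1 : c < n) :
    PySem.List.pyGetD (PySem.List.pyGetD
      ((PySem.List.pyRange 0 n 1).map
        (fun i => PySem.List.slice (PySem.List.pyGetD s i "").toList none (some n))) r []) c ' '
      = pvCell s r c := by
  have hlen := row_long n s h r hr0 hr1
  rw [PySem.List.pyGetD_map_pyRange_of_nonneg _ _ _ _ hr0 hr1]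
  rw [PySem.List.slice_to _ (by omega)]
  rw [PySem.List.pyGetD_eq_getElem _ ' ' hc0 (by rw [List.length_take]; push_cast; omega)]
  rw [List.getElem_take]
  unfold pvCell
  rw [PySem.List.pyGetD_eq_getElem _ ' ' hc0 (by omega)]

-- B's port is true exactly on a hit
lemma checkB_iff (n : Int) (s : List String) (h : Pre_check n s) :
    check_alt n s = true ↔ pvHit n s := by
  unfold check_alt
  simp only [List.any_append, List.any_map, Bool.or_eq_true, List.any_eq_true,
    PySem.List.mem_pyRange_one, Function.comp, PySem.Chars.isIn_iff_infix, infix_hash6_iff]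
  constructor
  · rintro (((⟨i, ⟨hi0, hi1⟩, k, hk⟩ | ⟨c, ⟨hc0, hc1⟩, k, hk⟩) | ⟨c, ⟨hc0, hc1⟩, k, hk⟩) | ⟨r, ⟨hr1, hrn⟩, k, hk⟩)
    · rw [PySem.List.slice_to _ (by omega), runN_take] at hk
      obtain ⟨hkn, hv⟩ := hk
      have hkn' : (k : Int) + 6 ≤ n := by
        have := row_long n s h i hi0 hi1; omega
      refine ⟨i, k, hi0, hi1, by omega, by omega, Or.inl ⟨by omega, fun t ht => ?_⟩⟩
      have hcell := cell_eq_getElem? n s h i ((k : Int) + t) hi0 hi1 (by omega) (by omega)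
      rw [show ((k : Int) + (t : Int)).toNat = k + t by omega] at hcell
      have := hv t ht
      rw [hcell] at this
      exact Option.some.inj this
    · rw [runN_map_pyRange] at hk
      obtain ⟨hkn, hv⟩ := hk
      refine ⟨k, c, by omega, by omega, hc0, hc1, Or.inr (Or.inl ⟨by omega, fun t ht => ?_⟩)⟩
      have := hv t ht
      rwa [cellB_eq n s h _ c (by omega) (by omega) hc0 hc1] at this
    · rw [runN_map_pyRange] at hk
      obtain ⟨hkn, hv⟩ := hk
      refine ⟨k, c + k, by omega, by omega, by omega, by omega, Or.inr (Or.inr ⟨by omega, by omega, fun t ht => ?_⟩)⟩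
      have := hv t ht
      rw [cellB_eq n s h _ _ (by omega) (by omega) (by omega) (by omega)] at this
      rwa [show c + ((k : Int) + t) = c + k + t by ring] at this
    · rw [runN_map_pyRange] at hk
      obtain ⟨hkn, hv⟩ := hk
      refine ⟨r + k, k, by omega, by omega, by omega, by omega, Or.inr (Or.inr ⟨by omega, by omega, fun t ht => ?_⟩)⟩
      have := hv t ht
      rw [cellB_eq n s h _ _ (by omega) (by omega) (by omega) (by omega)] at this
      rwa [show r + ((k : Int) + t) = r + k + t by ring] at this
  · rintro ⟨i, j, hi0, hi1, hj0, hj1, ⟨hj5, hr⟩ | ⟨hi5, hr⟩ | ⟨hi5, hj5, hr⟩⟩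
    · left; left; left
      refine ⟨i, ⟨hi0, hi1⟩, j.toNat, ?_⟩
      rw [PySem.List.slice_to _ (by omega), runN_take]
      have hlen := row_long n s h i hi0 hi1
      refine ⟨by omega, fun t ht => ?_⟩
      have hcell := cell_eq_getElem? n s h i (j + t) hi0 hi1 (by omega) (by omega)
      rw [show ((j : Int) + (t : Int)).toNat = j.toNat + t by omega] at hcell
      rw [hcell, hr t ht]
    · left; left; right
      refine ⟨j, ⟨hj0, hj1⟩, i.toNat, ?_⟩
      rw [runN_map_pyRange]
      refine ⟨by omega, fun t ht => ?_⟩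
      rw [cellB_eq n s h _ j (by omega) (by omega) hj0 hj1]
      rw [show ((i.toNat : Int) + t) = i + t by omega]
      exact hr t ht
    · by_cases hij : i ≤ j
      · left; right
        refine ⟨j - i, ⟨by omega, by omega⟩, i.toNat, ?_⟩
        rw [runN_map_pyRange]
        refine ⟨by omega, fun t ht => ?_⟩
        rw [cellB_eq n s h _ _ (by omega) (by omega) (by omega) (by omega)]
        rw [show ((i.toNat : Int) + t) = i + t by omega,
          show j - i + (i + t) = j + t by ring]
        exact hr t ht
      · right
        refine ⟨i - j, ⟨by omega, by omega⟩, j.toNat, ?_⟩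
        rw [runN_map_pyRange]
        refine ⟨by omega, fun t ht => ?_⟩
        rw [cellB_eq n s h _ _ (by omega) (by omega) (by omega) (by omega)]
        rw [show ((j.toNat : Int) + t) = j + t by omega,
          show i - j + (j + t) = i + t by ring]
        exact hr t ht

-- ===== VERDICT (by name: the statement is the Claim_ definition above) =====
theorem check_spec : Claim_equal_check := by
  intro n s _ hpre
  unfold Spec_check
  rw [Bool.eq_iff_iff, checkA_iff n s hpre, checkB_iff n s hpre]
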